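-- pv_equiv track=rewrite | github.com/cepalium/daily-coding-problems | solutions/140.py | findUniqueElements3
-- ===== SOURCE A (Python) =====
-- def findUniqueElements3(array):
-- # input: array of integers s.t 2 elements appear exactly once and all other elements appear exactly twice
-- # output: array of 2 elements that appear only once
-- # method: dict to store frequency of elements; if frequency == 2, delete pair from dict
-- # running time: O(n); space complexity: O(n)
--     freq = {x:0 for x in array}     # frequency dictionary initialized ~> O(n)
--     output = []                     # output list initialized
--     for x in array:
--         freq[x] += 1                # count frequency of each elements by increment ~> O(n)
--     for k, v in freq.items():
--         if v == 1:
--             output.append(k)        # add elements of 1 occurence to output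
--     return output
-- ===== SOURCE B (Python) =====
-- def findUniqueElements3(array):
--     # One pass: 'once' holds elements seen exactly once so far (insertion order),
--     # 'seen_more' holds elements seen at least twice.
--     once = {}
--     seen_more = set()
--     for x in array:
--         if x in seen_more:
--             continue
--         elif x in once:
--             del once[x]
--             seen_more.add(x)
--         else:
--             once[x] = None
--     return list(once)
-- ===== Notes on version B (the rewrite author's own statement) =====
-- stated objective: alternative
-- what changed: Replaces A's two counting passes plus a dict scan with a single pass that maintains an insertion-ordered dict of elements seen exactly once and a set of elements seen twice or more.
import Mathlib
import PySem

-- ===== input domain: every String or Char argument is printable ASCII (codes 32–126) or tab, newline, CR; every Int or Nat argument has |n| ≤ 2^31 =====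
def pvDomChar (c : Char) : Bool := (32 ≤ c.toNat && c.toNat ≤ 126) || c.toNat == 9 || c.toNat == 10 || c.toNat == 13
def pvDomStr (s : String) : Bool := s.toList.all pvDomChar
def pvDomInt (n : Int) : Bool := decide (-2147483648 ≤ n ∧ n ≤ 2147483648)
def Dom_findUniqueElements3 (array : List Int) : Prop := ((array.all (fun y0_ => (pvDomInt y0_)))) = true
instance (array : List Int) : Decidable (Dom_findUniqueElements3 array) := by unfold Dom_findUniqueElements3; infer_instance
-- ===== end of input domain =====

-- B replaces A's two counting passes plus a scan of the frequency dict with a single pass that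
-- keeps an insertion-ordered dict of elements seen exactly once and a set of elements seen twice
-- or more (objective: alternative decomposition, same O(n) cost).

-- ===== PORT A =====
def findUniqueElements3 (array : List Int) : List Int :=
  -- freq = {x:0 for x in array}
  let freq := array.foldl (fun d x => d.insert x (0 : Int)) PySem.Dict.empty
  -- for x in array: freq[x] += 1
  let freq2 := array.foldl (fun d x => d.modify x 0 (· + 1)) freq
  -- for k, v in freq.items(): if v == 1: output.append(k)
  freq2.items.foldl (fun out kv => if kv.2 == 1 then out ++ [kv.1] else out) []

-- ===== PORT B =====
-- the loop body of B: skip if in seen_more; move from once to seen_more on second sight; else record in once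
def b3Step (st : PySem.Dict Int Unit × PySem.Set Int) (x : Int) :
    PySem.Dict Int Unit × PySem.Set Int :=
  if st.2.contains x then st
  else if st.1.contains x then (st.1.erase x, PySem.Set.add st.2 x)
  else (st.1.insert x (), st.2)

def findUniqueElements3_alt (array : List Int) : List Int :=
  (array.foldl b3Step (PySem.Dict.empty, PySem.Set.empty)).1.keys

-- ===== PRECONDITION & SPEC =====
def Spec_findUniqueElements3 (array : List Int) (out : List Int) : Prop := out = findUniqueElements3_alt array
instance (array : List Int) (out : List Int) : Decidable (Spec_findUniqueElements3 array out) := by unfold Spec_findUniqueElements3; infer_instance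

-- ===== CLAIM (what is proved, stated in full; the proofs are below) =====
def Claim_equal_findUniqueElements3 : Prop := ∀ (array : List Int), Dom_findUniqueElements3 array → Spec_findUniqueElements3 array (findUniqueElements3 array)

-- ===== LEMMAS AND PROOFS =====

-- the common characterisation: the elements of count 1, in first-occurrence order
def uniqOnce (l : List Int) : List Int :=
  (PySem.List.dedup l).filter (fun k => l.count k == 1)

lemma getD_zero_fold (l : List Int) (d : PySem.Dict Int Int)
    (h : ∀ k, d.getD k 0 = 0) (k : Int) :
    (l.foldl (fun d x => d.insert x (0:Int)) d).getD k 0 = 0 := by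
  induction l generalizing d with
  | nil => exact h k
  | cons x xs ih =>
      exact ih _ (fun k' => by rw [PySem.Dict.getD_insert]; split <;> simp [h])

lemma a_char (array : List Int) : findUniqueElements3 array = uniqOnce array := by
  have hdef : findUniqueElements3 array =
      (array.foldl (fun d x => d.modify x 0 (· + 1))
        (array.foldl (fun d x => d.insert x (0:Int)) PySem.Dict.empty)).items.foldl
        (fun out kv => if kv.2 == 1 then out ++ [kv.1] else out) [] := rfl
  rw [hdef]
  set freq := array.foldl (fun d x => d.insert x (0:Int)) PySem.Dict.empty with hfreq
  set freq2 := array.foldl (fun d x => d.modify x 0 (· + 1)) freq with hfreq2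
  have hkeys : freq.keys = PySem.List.dedup array := by
    rw [hfreq, PySem.Dict.keys_foldl_insert]
    simp [PySem.Set.update_nil_left]
  have hkeys2 : freq2.keys = PySem.List.dedup array := by
    rw [hfreq2, PySem.Dict.keys_foldl_modify, hkeys]
    rw [PySem.Set.update_eq_append_filter]
    have hnil : (PySem.Set.ofList array).filter (fun y => !(PySem.Set.contains (PySem.List.dedup array) y)) = [] := by
      rw [List.filter_eq_nil_iff]
      intro y hy
      simp only [PySem.Set.contains_eq_listContains, List.contains_eq_mem, Bool.not_eq_true',
        decide_eq_false_iff_not, not_not]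
      exact (PySem.List.mem_dedup array y).2 ((PySem.Set.mem_ofList array y).1 hy)
    rw [hnil, List.append_nil]
  have hnd2 : freq2.keys.Nodup := by rw [hkeys2]; exact PySem.List.nodup_dedup array
  have hget : ∀ k, freq2.getD k 0 = (array.count k : Int) := by
    intro k
    rw [hfreq2, PySem.Dict.getD_foldl_modify_add_one]
    rw [hfreq, getD_zero_fold _ _ (fun k => PySem.Dict.getD_empty k 0)]
    simp
  have hitems : freq2.items = (PySem.List.dedup array).map (fun k => (k, (array.count k : Int))) := by
    rw [PySem.Dict.items_eq_map_keys freq2 hnd2 0, hkeys2]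
    exact List.map_congr_left (fun k _ => by rw [hget])
  rw [hitems, PySem.List.foldl_append_if]
  rw [List.filter_map, List.map_map]
  unfold uniqOnce
  simp [Function.comp_def]
  exact List.filter_congr (fun k _ => by simp)

lemma dedup_append_singleton (l : List Int) (x : Int) :
    PySem.List.dedup (l ++ [x]) =
      if x ∈ l then PySem.List.dedup l else PySem.List.dedup l ++ [x] := by
  simp only [PySem.List.dedup_eq_ofList, PySem.Set.ofList_append_singleton,
    PySem.Set.add_eq_ite, PySem.Set.mem_ofList]

lemma count_append_singleton (l : List Int) (x y : Int) :
    (l ++ [x]).count y = l.count y + if y = x then 1 else 0 := by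
  rw [List.count_append, List.count_singleton]
  by_cases h : y = x
  · subst h; simp
  · have h' : ¬ x = y := fun e => h e.symm
    simp [h, h']

-- the loop invariant of B: after any prefix l, 'once' holds exactly the count-1 elements of l
-- (in first-occurrence order, each mapped to ()), and 'seen_more' holds the count-≥2 elements
lemma b3_inv (l : List Int) :
    (l.foldl b3Step (PySem.Dict.empty, PySem.Set.empty)).1 =
      PySem.Dict.mk ((uniqOnce l).map (fun k => (k, ()))) ∧
    ∀ x : Int, x ∈ (l.foldl b3Step (PySem.Dict.empty, PySem.Set.empty)).2 ↔ 2 ≤ l.count x := by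
  induction l using List.reverseRecOn with
  | nil => constructor <;> simp [uniqOnce, PySem.Dict.empty, PySem.List.dedup, PySem.Set.empty]
  | append_singleton l x ih =>
    obtain ⟨ihd, ihs⟩ := ih
    rw [List.foldl_append] at *
    simp only [List.foldl_cons, List.foldl_nil]
    set st := l.foldl b3Step (PySem.Dict.empty, PySem.Set.empty) with hst
    by_cases h2 : 2 ≤ l.count x
    · -- seen at least twice already: state unchanged
      have hcx : st.2.contains x = true := (PySem.Set.contains_iff _ _).2 ((ihs x).2 h2)
      have hxl : x ∈ l := List.count_pos_iff.1 (by omega)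
      simp only [b3Step, hcx, if_true]
      constructor
      · rw [ihd]
        congr 1
        unfold uniqOnce
        rw [dedup_append_singleton, if_pos hxl]
        congr 1
        refine List.filter_congr ?_
        intro k hk
        rw [count_append_singleton, Bool.eq_iff_iff]
        simp only [beq_iff_eq]
        by_cases hkx : k = x
        · subst hkx; simp; omega
        · simp [hkx]
      · intro y
        rw [ihs y, count_append_singleton]
        by_cases hyx : y = x
        · subst hyx; simp; exact iff_of_true h2 hxl
        · simp [hyx]
    · by_cases h1 : l.count x = 1
      · -- second sighting: move from once to seen_more
        have hxl : x ∈ l := List.count_pos_iff.1 (by omega)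
        have hcs : st.2.contains x = false := by
          rw [← Bool.not_eq_true, PySem.Set.contains_iff]
          intro h; have := (ihs x).1 h; omega
        have hcd : st.1.contains x = true := by
          rw [ihd]
          simp only [PySem.Dict.contains, List.any_map, List.any_eq_true]
          exact ⟨x, by simp [uniqOnce, hxl, h1], by simp⟩
        simp only [b3Step, hcs, hcd, if_true, Bool.false_eq_true, if_false]
        constructor
        · rw [ihd]
          simp only [PySem.Dict.erase]
          congr 1
          rw [List.filter_map]
          congr 1
          simp only [Function.comp_def]
          unfold uniqOnce
          rw [List.filter_filter, dedup_append_singleton, if_pos hxl]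
          refine List.filter_congr ?_
          intro k hk
          rw [count_append_singleton, Bool.eq_iff_iff]
          simp only [Bool.and_eq_true, Bool.not_eq_true', beq_eq_false_iff_ne, beq_iff_eq]
          by_cases hkx : k = x
          · subst hkx; simp [h1]
          · simp [hkx]
        · intro y
          rw [PySem.Set.mem_add, ihs y, count_append_singleton]
          by_cases hyx : y = x
          · subst hyx; simp [h1]
          · simp [hyx]
      · -- first sighting: insert into once
        have hxl : x ∉ l := by
          intro h; have := List.count_pos_iff.2 h; omega
        have h0 : l.count x = 0 := by omega
        have hcs : st.2.contains x = false := by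
          rw [← Bool.not_eq_true, PySem.Set.contains_iff]
          intro h; have := (ihs x).1 h; omega
        have hcd : st.1.contains x = false := by
          rw [ihd, ← Bool.not_eq_true]
          simp only [PySem.Dict.contains, List.any_map, List.any_eq_true]
          rintro ⟨k, hk, hkx⟩
          simp only [Function.comp, beq_iff_eq] at hkx
          subst hkx
          exact hxl ((PySem.List.mem_dedup l k).1 (List.mem_of_mem_filter hk))
        simp only [b3Step, hcs, hcd, Bool.false_eq_true, if_false]
        constructor
        · apply PySem.Dict.ext
          rw [PySem.Dict.items_insert_of_not_contains st.1 () hcd, ihd]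
          unfold uniqOnce
          rw [dedup_append_singleton, if_neg hxl, List.filter_append, List.map_append]
          have e1 : (PySem.List.dedup l).filter (fun k => (l ++ [x]).count k == 1) =
              (PySem.List.dedup l).filter (fun k => l.count k == 1) := by
            refine List.filter_congr ?_
            intro k hk
            have hkl : k ∈ l := (PySem.List.mem_dedup l k).1 hk
            have hkx : k ≠ x := fun h => hxl (h ▸ hkl)
            rw [count_append_singleton, if_neg hkx]
            simp
          have e2 : ([x].filter (fun k => (l ++ [x]).count k == 1)).map (fun k => (k, ())) =
              [(x, ())] := by
            have : (l ++ [x]).count x = 1 := by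
              rw [count_append_singleton]; simp [h0]
            simp [List.filter, this]
          rw [e1, e2]
        · intro y
          rw [ihs y, count_append_singleton]
          by_cases hyx : y = x
          · subst hyx; simp [h0]
          · simp [hyx]

lemma b_char (array : List Int) : findUniqueElements3_alt array = uniqOnce array := by
  unfold findUniqueElements3_alt
  rw [(b3_inv array).1]
  simp [PySem.Dict.keys, Function.comp_def]

-- ===== VERDICT (by name: the statement is the Claim_ definition above) =====
theorem findUniqueElements3_spec : Claim_equal_findUniqueElements3 := by
  intro array _
  unfold Spec_findUniqueElements3
  rw [a_char, b_char]
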